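-- pv_equiv track=rewrite | github.com/shupac800/jackbutler | src/jackbutler/analysis/commentary.py | _detect_contour
-- ===== SOURCE A (Python) =====
-- def _detect_contour(midi_seq: list[int]) -> str:
--     """Classify pitch contour as ascending, descending, arch, valley, or static."""
--     if len(midi_seq) <= 1:
--         return "static"
--     if len(set(midi_seq)) == 1:
--         return "static"
--
--     diffs = [midi_seq[i + 1] - midi_seq[i] for i in range(len(midi_seq) - 1)]
--     ups = sum(1 for d in diffs if d > 0)
--     downs = sum(1 for d in diffs if d < 0)
--
--     if downs == 0:
--         return "ascending"
--     if ups == 0: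
--         return "descending"
--
--     # Check for arch (up then down) or valley (down then up)
--     peak_idx = midi_seq.index(max(midi_seq))
--     valley_idx = midi_seq.index(min(midi_seq))
--
--     if 0 < peak_idx < len(midi_seq) - 1 and ups >= downs:
--         return "ascending\u2013descending"
--     if 0 < valley_idx < len(midi_seq) - 1 and downs >= ups:
--         return "descending\u2013ascending"
--
--     if ups > downs:
--         return "ascending"
--     if downs > ups:
--         return "descending"
--     return "undulating"
-- ===== SOURCE B (Python) =====
-- def _detect_contour(midi_seq: list[int]) -> str:
--     """Order-theoretic reformulation: monotonicity is tested by comparing the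
--     sequence with its sorted version (and the reverse), the arch/valley
--     position checks use endpoint/membership tests on the global extremes
--     taken from the sorted list, and a single signed 'net' of step signs
--     replaces the two separate up/down counts."""
--     n = len(midi_seq)
--     if n <= 1:
--         return "static"
--     asc = sorted(midi_seq)
--     M, m = asc[-1], asc[0]
--     if m == M:
--         return "static"
--     if midi_seq == asc:
--         return "ascending"          # no falling step
--     if midi_seq == asc[::-1]:
--         return "descending"         # no rising step
--     net = sum((b > a) - (b < a) for a, b in zip(midi_seq, midi_seq[1:]))
--     interior = midi_seq[:-1]
--     if midi_seq[0] != M and M in interior and net >= 0: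
--         return "ascending\u2013descending"
--     if midi_seq[0] != m and m in interior and net <= 0:
--         return "descending\u2013ascending"
--     if net > 0:
--         return "ascending"
--     if net < 0:
--         return "descending"
--     return "undulating"
-- ===== Notes on version B (the rewrite author's own statement) =====
-- stated objective: alternative
-- what changed: Replaced A's diff-counting and index arithmetic by an order-theoretic formulation: monotonicity is detected by comparing the sequence with sorted(seq) and its reverse, the peak/valley interior checks become endpoint-inequality and membership tests on the sorted list's extremes, a single signed sum of step signs replaces the two separate up/down counts, and the all-equal test becomes min==max read off the sorted list.
import Mathlib
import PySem

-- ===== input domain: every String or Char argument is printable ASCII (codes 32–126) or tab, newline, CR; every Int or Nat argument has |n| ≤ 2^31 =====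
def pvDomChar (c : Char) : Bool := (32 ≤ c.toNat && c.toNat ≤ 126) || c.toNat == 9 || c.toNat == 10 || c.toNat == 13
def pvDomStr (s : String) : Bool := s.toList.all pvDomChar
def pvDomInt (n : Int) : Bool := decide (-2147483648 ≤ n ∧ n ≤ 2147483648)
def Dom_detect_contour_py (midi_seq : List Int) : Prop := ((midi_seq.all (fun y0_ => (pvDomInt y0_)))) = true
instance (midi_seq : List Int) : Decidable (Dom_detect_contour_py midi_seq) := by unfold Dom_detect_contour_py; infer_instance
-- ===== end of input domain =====

-- B replaces A's diff counting and index arithmetic by an order-theoretic test: monotonicity is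
-- detected by comparing the sequence with its sorted version (and its reverse), the peak/valley
-- position checks become endpoint/membership tests on the sorted list's extremes, and a single
-- signed sum of step signs replaces the two separate up/down counts.

-- ===== PORT A =====
def detect_contour_py (midi_seq : List Int) : String :=
  if midi_seq.length ≤ 1 then "static"
  else if (PySem.Set.ofList midi_seq).length = 1 then "static"
  else
    let diffs := (List.range (midi_seq.length - 1)).map
      (fun (i : Nat) => (PySem.List.pyGet? midi_seq ((i : Int) + 1)).getD 0 -
                (PySem.List.pyGet? midi_seq ((i : Nat) : Int)).getD 0)
    let ups := diffs.countP (fun d => decide (0 < d))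
    let downs := diffs.countP (fun d => decide (d < 0))
    if downs = 0 then "ascending"
    else if ups = 0 then "descending"
    else
      let peak_idx := (PySem.List.index? midi_seq ((PySem.List.max? midi_seq (fun x => x)).getD 0)).getD 0
      let valley_idx := (PySem.List.index? midi_seq ((PySem.List.min? midi_seq (fun x => x)).getD 0)).getD 0
      if 0 < peak_idx ∧ peak_idx < midi_seq.length - 1 ∧ downs ≤ ups then "ascending–descending"
      else if 0 < valley_idx ∧ valley_idx < midi_seq.length - 1 ∧ ups ≤ downs then "descending–ascending"
      else if downs < ups then "ascending"
      else if ups < downs then "descending"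
      else "undulating"

-- ===== PORT B =====
def detect_contour_py_alt (midi_seq : List Int) : String :=
  if midi_seq.length ≤ 1 then "static"
  else
    let asc := PySem.List.sorted midi_seq (fun x => x) false
    let M := (PySem.List.pyGet? asc (-1)).getD 0
    let m := (PySem.List.pyGet? asc 0).getD 0
    if m = M then "static"
    else if midi_seq = asc then "ascending"
    else if midi_seq = (PySem.List.slice? asc none none (-1)).getD [] then "descending"
    else
      let net := ((midi_seq.zip (PySem.List.slice midi_seq (some 1) none)).map
        (fun p => (if p.1 < p.2 then (1 : Int) else 0) - (if p.2 < p.1 then 1 else 0))).sum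
      let interior := PySem.List.slice midi_seq none (some (-1))
      if (PySem.List.pyGet? midi_seq 0).getD 0 ≠ M ∧ M ∈ interior ∧ 0 ≤ net then "ascending–descending"
      else if (PySem.List.pyGet? midi_seq 0).getD 0 ≠ m ∧ m ∈ interior ∧ net ≤ 0 then "descending–ascending"
      else if 0 < net then "ascending"
      else if net < 0 then "descending"
      else "undulating"

-- ===== PRECONDITION & SPEC =====
def Spec_detect_contour_py (midi_seq : List Int) (out : String) : Prop := out = detect_contour_py_alt midi_seq
instance (midi_seq : List Int) (out : String) : Decidable (Spec_detect_contour_py midi_seq out) := by unfold Spec_detect_contour_py; infer_instance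

-- ===== CLAIM (what is proved, stated in full; the proofs are below) =====
def Claim_equal_detect_contour_py : Prop := ∀ (midi_seq : List Int), Dom_detect_contour_py midi_seq → Spec_detect_contour_py midi_seq (detect_contour_py midi_seq)

-- ===== LEMMAS AND PROOFS =====

-- adjacent differences l[i+1] - l[i]
def diffsZ (l : List Int) : List Int := List.zipWith (fun p q => q - p) l l.tail

lemma diffsA_eq : ∀ (l : List Int),
    (List.range (l.length - 1)).map
      (fun (i : Nat) => (PySem.List.pyGet? l ((i : Int) + 1)).getD 0 -
                (PySem.List.pyGet? l ((i : Nat) : Int)).getD 0) = diffsZ l := by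
  intro l
  apply List.ext_getElem
  · simp [diffsZ]
  · intro i h1 h2
    simp only [List.getElem_map, List.getElem_range, diffsZ, List.getElem_zipWith]
    have hlen : i < l.length - 1 := by simpa using h1
    have hi1 : i + 1 < l.length := by omega
    have hcast : ((i : Int) + 1) = ((i + 1 : Nat) : Int) := by push_cast; ring
    rw [hcast, PySem.List.pyGet?_natCast, PySem.List.pyGet?_natCast]
    have htail : l.tail[i]'(by simp; omega) = l[i + 1]'hi1 := by
      simp [List.getElem_tail]
    rw [List.getElem?_eq_getElem hi1, List.getElem?_eq_getElem (by omega : i < l.length)]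
    simp [htail]

lemma foldl_add_len_ge : ∀ (t s : List Int), s.length ≤ (t.foldl PySem.Set.add s).length := by
  intro t
  induction t with
  | nil => intro s; simp
  | cons x t ih =>
    intro s
    refine le_trans ?_ (ih (PySem.Set.add s x))
    simp [PySem.Set.add]
    split_ifs <;> simp

lemma foldl_add_len_eq_iff : ∀ (t s : List Int),
    (t.foldl PySem.Set.add s).length = s.length ↔ ∀ x ∈ t, x ∈ s := by
  intro t
  induction t with
  | nil => intro s; simp
  | cons x t ih =>
    intro s
    simp only [List.foldl_cons, List.mem_cons]
    by_cases hx : x ∈ s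
    · have : PySem.Set.add s x = s := by
        simp [PySem.Set.add, PySem.Set.contains, hx]
      rw [this, ih]
      constructor
      · intro h y hy; rcases hy with rfl | hy; exact hx; exact h y hy
      · intro h y hy; exact h y (Or.inr hy)
    · have hadd : PySem.Set.add s x = s ++ [x] := by
        simp [PySem.Set.add, PySem.Set.contains, hx]
      rw [hadd]
      constructor
      · intro h
        exfalso
        have := foldl_add_len_ge t (s ++ [x])
        simp at this
        omega
      · intro h; exact absurd (h x (Or.inl rfl)) hx

lemma setlen_one_iff : ∀ (a : Int) (t : List Int),
    (PySem.Set.ofList (a :: t)).length = 1 ↔ ∀ x ∈ t, x = a := by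
  intro a t
  have h1 : PySem.Set.ofList (a :: t) = t.foldl PySem.Set.add [a] := by
    rw [PySem.Set.ofList_eq_foldl]
    simp [PySem.Set.add, PySem.Set.contains]
  rw [h1]
  have := foldl_add_len_eq_iff t [a]
  simp only [List.length_singleton] at this
  rw [this]
  simp

-- downs = 0 iff the list is adjacently non-decreasing
lemma downs_zero_iff : ∀ (l : List Int),
    (diffsZ l).countP (fun d => decide (d < 0)) = 0 ↔ List.IsChain (· ≤ ·) l := by
  intro l
  match l with
  | [] => simp [diffsZ]
  | [x] => simp [diffsZ]
  | a :: b :: t =>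
    have ih := downs_zero_iff (b :: t)
    simp only [diffsZ, List.tail_cons, List.zipWith_cons_cons, List.countP_cons] at *
    rw [List.isChain_cons_cons]
    constructor
    · intro h
      obtain ⟨hr, hif⟩ := Nat.add_eq_zero.mp h
      have h1 : a ≤ b := by simp at hif; omega
      exact ⟨h1, ih.1 hr⟩
    · rintro ⟨h1, h2⟩
      rw [ih.2 h2]
      simp
      omega

-- ups = 0 iff the list is adjacently non-increasing
lemma ups_zero_iff : ∀ (l : List Int),
    (diffsZ l).countP (fun d => decide (0 < d)) = 0 ↔ List.IsChain (fun x y => y ≤ x) l := by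
  intro l
  match l with
  | [] => simp [diffsZ]
  | [x] => simp [diffsZ]
  | a :: b :: t =>
    have ih := ups_zero_iff (b :: t)
    simp only [diffsZ, List.tail_cons, List.zipWith_cons_cons, List.countP_cons] at *
    rw [List.isChain_cons_cons]
    constructor
    · intro h
      obtain ⟨hr, hif⟩ := Nat.add_eq_zero.mp h
      have h1 : b ≤ a := by simp at hif; omega
      exact ⟨h1, ih.1 hr⟩
    · rintro ⟨h1, h2⟩
      rw [ih.2 h2]
      simp
      omega

-- the signed net of step signs is ups - downs
lemma net_eq : ∀ (l : List Int),
    ((l.zip l.tail).map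
      (fun p => (if p.1 < p.2 then (1 : Int) else 0) - (if p.2 < p.1 then 1 else 0))).sum
    = ((diffsZ l).countP (fun d => decide (0 < d)) : Int)
      - ((diffsZ l).countP (fun d => decide (d < 0)) : Int) := by
  intro l
  match l with
  | [] => simp [diffsZ]
  | [x] => simp [diffsZ]
  | a :: b :: t =>
    have ih := net_eq (b :: t)
    simp only [diffsZ, List.tail_cons, List.zip_cons_cons, List.zipWith_cons_cons,
      List.map_cons, List.sum_cons, List.countP_cons] at *
    rw [ih]
    by_cases h1 : a < b
    · simp [h1, show ¬ b < a by omega, show 0 < b - a by omega, show ¬ b - a < 0 by omega]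
      push_cast; ring
    · by_cases h2 : b < a
      · simp [h1, h2, show ¬ 0 < b - a by omega, show b - a < 0 by omega]
        push_cast; ring
      · simp [h1, h2, show ¬ 0 < b - a by omega, show ¬ b - a < 0 by omega]

-- running max/min facts
lemma foldl_max_spec : ∀ (t : List Int) (a : Int),
    t.foldl max a ∈ a :: t ∧ ∀ y ∈ a :: t, y ≤ t.foldl max a := by
  intro t
  induction t with
  | nil => intro a; simp
  | cons x t ih =>
    intro a
    have h := ih (max a x)
    simp only [List.foldl_cons]
    constructor
    · rcases List.mem_cons.1 h.1 with hm | hm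
      · rw [hm]; rcases max_choice a x with hc | hc <;> simp [hc]
      · simp [hm]
    · intro y hy
      have hm := h.2 (max a x) (by simp)
      rcases List.mem_cons.1 hy with hya | hy
      · rw [hya]; exact le_trans (le_max_left a x) hm
      · rcases List.mem_cons.1 hy with hyx | hy
        · rw [hyx]; exact le_trans (le_max_right a x) hm
        · exact h.2 y (by simp [hy])

lemma foldl_min_spec : ∀ (t : List Int) (a : Int),
    t.foldl min a ∈ a :: t ∧ ∀ y ∈ a :: t, t.foldl min a ≤ y := by
  intro t
  induction t with
  | nil => intro a; simp
  | cons x t ih =>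
    intro a
    have h := ih (min a x)
    simp only [List.foldl_cons]
    constructor
    · rcases List.mem_cons.1 h.1 with hm | hm
      · rw [hm]; rcases min_choice a x with hc | hc <;> simp [hc]
      · simp [hm]
    · intro y hy
      have hm := h.2 (min a x) (by simp)
      rcases List.mem_cons.1 hy with hya | hy
      · rw [hya]; exact le_trans hm (min_le_left a x)
      · rcases List.mem_cons.1 hy with hyx | hy
        · rw [hyx]; exact le_trans hm (min_le_right a x)
        · exact h.2 y (by simp [hy])

-- in a ≤-pairwise list every element is at most the last one
lemma pairwise_le_getLast : ∀ (xs : List Int) (h : xs ≠ []),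
    xs.Pairwise (· ≤ ·) → ∀ x ∈ xs, x ≤ xs.getLast h := by
  intro xs
  induction xs with
  | nil => intro h; simp at h
  | cons a t ih =>
    intro h hp x hx
    match t with
    | [] => simp at hx; simp [hx]
    | b :: t' =>
      rw [List.getLast_cons (by simp)]
      rcases List.mem_cons.1 hx with rfl | hx
      · exact (List.pairwise_cons.1 hp).1 _ (List.getLast_mem (by simp))
      · exact ih (by simp) (List.pairwise_cons.1 hp).2 x hx

-- first-occurrence index vs membership in the initial segment
lemma index_lt_iff_mem_dropLast (l : List Int) (v : Int) (k : Nat)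
    (h : PySem.List.index? l v = some k) : k < l.length - 1 ↔ v ∈ l.dropLast := by
  obtain ⟨hk, hval, hmin⟩ := PySem.List.getElem_of_index?_eq_some h
  constructor
  · intro hlt
    have hk' : k < l.dropLast.length := by simp [List.length_dropLast]; omega
    have : l.dropLast[k] = v := by rw [List.getElem_dropLast]; exact hval
    exact this ▸ List.getElem_mem hk'
  · intro hm
    obtain ⟨j, hj, hjv⟩ := List.getElem_of_mem hm
    have hj' : j < l.length - 1 := by simpa [List.length_dropLast] using hj
    have hlj : l[j]'(by omega) = v := by rw [← List.getElem_dropLast]; exact hjv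
    by_contra hc
    have : j < k := by omega
    exact hmin j this hlj

lemma sorted_eq_self_iff_chain (l : List Int) :
    l = PySem.List.sorted l (fun x => x) false ↔ List.IsChain (· ≤ ·) l := by
  constructor
  · intro h
    have hp := PySem.List.sorted_pairwise l (fun x => x)
    rw [← h] at hp
    exact List.isChain_iff_pairwise.2 (hp.imp (fun h => h))
  · intro h
    have hp : l.Pairwise (fun x y => (fun z : Int => z) x ≤ (fun z : Int => z) y) :=
      (List.isChain_iff_pairwise.1 h).imp (fun h => h)
    exact (PySem.List.sorted_eq_self_of_pairwise l (fun x => x) hp).symm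

lemma sorted_rev_eq_iff_chain (l : List Int) :
    l = (PySem.List.sorted l (fun x => x) false).reverse ↔
      List.IsChain (fun x y => y ≤ x) l := by
  constructor
  · intro h
    have hrev := congrArg List.reverse h
    rw [List.reverse_reverse] at hrev
    have hp := PySem.List.sorted_pairwise l (fun x => x)
    rw [← hrev] at hp
    have hp2 : l.Pairwise (fun x y => y ≤ x) :=
      List.pairwise_reverse.1 (hp.imp (fun h => h))
    exact List.isChain_iff_pairwise.2 hp2
  · intro h
    have hp : l.Pairwise (fun x y => y ≤ x) := List.isChain_iff_pairwise.1 h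
    have hrevp : l.reverse.Pairwise (fun x y => x ≤ y) :=
      List.pairwise_reverse.2 (hp.imp (fun h => h))
    have := PySem.List.sorted_id_eq_of_perm_of_pairwise l l.reverse
      (l.reverse_perm) hrevp
    rw [this, List.reverse_reverse]

lemma index_pos_iff (a : Int) (t : List Int) (v : Int) (k : Nat)
    (h : PySem.List.index? (a :: t) v = some k) : 0 < k ↔ a ≠ v := by
  obtain ⟨hk, hval, hmin⟩ := PySem.List.getElem_of_index?_eq_some h
  constructor
  · intro hpos hav
    exact hmin 0 hpos (by simp [← hav])
  · intro hne
    by_contra hc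
    have hk0 : k = 0 := by omega
    subst hk0
    simp at hval
    exact hne hval

lemma main_eq : ∀ (l : List Int), detect_contour_py l = detect_contour_py_alt l := by
  intro l
  match l with
  | [] => rfl
  | [x] => rfl
  | a :: b :: t =>
    have hlen : ¬ ((a :: b :: t).length ≤ 1) := by simp
    have hmax := foldl_max_spec (b :: t) a
    have hmin := foldl_min_spec (b :: t) a
    obtain ⟨c, cs, hasc⟩ := List.exists_cons_of_ne_nil
      (show PySem.List.sorted (a :: b :: t) (fun x => x) false ≠ [] by
        simp [PySem.List.sorted_eq_nil_iff])
    -- the head of the sorted list is the minimum value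
    have hc_mem : c ∈ (a :: b :: t) := by
      rw [← PySem.List.mem_sorted (a :: b :: t) (fun x => x) false, hasc]
      simp
    have hc_min : c = (b :: t).foldl min a := by
      apply le_antisymm
      · exact PySem.List.key_head_sorted_le (a :: b :: t) (fun x => x) hasc _ hmin.1
      · exact hmin.2 c hc_mem
    -- the last of the sorted list is the maximum value
    have hpair : (PySem.List.sorted (a :: b :: t) (fun x => x) false).Pairwise (· ≤ ·) :=
      (PySem.List.sorted_pairwise (a :: b :: t) (fun x => x)).imp (fun h => h)
    have hlast_mem : (PySem.List.sorted (a :: b :: t) (fun x => x) false).getLast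
        (by rw [hasc]; simp) ∈ (a :: b :: t) := by
      rw [← PySem.List.mem_sorted (a :: b :: t) (fun x => x) false]
      exact List.getLast_mem _
    have hlast : (PySem.List.sorted (a :: b :: t) (fun x => x) false).getLast
        (by rw [hasc]; simp) = (b :: t).foldl max a := by
      apply le_antisymm
      · exact hmax.2 _ hlast_mem
      · exact pairwise_le_getLast _ _ hpair _
          ((PySem.List.mem_sorted (a :: b :: t) (fun x => x) false _).2 hmax.1)
    -- B's M and m
    have hBM : (PySem.List.pyGet? (PySem.List.sorted (a :: b :: t) (fun x => x) false) (-1)).getD 0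
        = (b :: t).foldl max a := by
      rw [PySem.List.pyGet?_neg_one,
        List.getLast?_eq_some_getLast (by rw [hasc]; simp), hlast]
      rfl
    have hBm : (PySem.List.pyGet? (PySem.List.sorted (a :: b :: t) (fun x => x) false) 0).getD 0
        = (b :: t).foldl min a := by
      rw [hasc]
      simp only [PySem.List.pyGet?_zero_cons, Option.getD_some]
      exact hc_min
    -- static condition
    have hstatic : ((PySem.Set.ofList (a :: b :: t)).length = 1)
        ↔ ((b :: t).foldl min a = (b :: t).foldl max a) := by
      rw [setlen_one_iff]
      constructor
      · intro h
        have hmx : (b :: t).foldl max a = a := by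
          rcases List.mem_cons.1 hmax.1 with h1 | h1
          · exact h1
          · exact h _ h1
        have hmn : (b :: t).foldl min a = a := by
          rcases List.mem_cons.1 hmin.1 with h1 | h1
          · exact h1
          · exact h _ h1
        rw [hmx, hmn]
      · intro h x hx
        have h1 := hmin.2 x (by simp [hx])
        have h2 := hmax.2 x (by simp [hx])
        have h3 := hmin.2 a (by simp)
        have h4 := hmax.2 a (by simp)
        omega
    -- index facts for the peak and valley
    have hmaxk : ∃ k, PySem.List.index? (a :: b :: t) ((b :: t).foldl max a) = some k :=
      Option.isSome_iff_exists.1 ((PySem.List.index?_isSome_iff _ _).2 hmax.1)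
    have hmink : ∃ k, PySem.List.index? (a :: b :: t) ((b :: t).foldl min a) = some k :=
      Option.isSome_iff_exists.1 ((PySem.List.index?_isSome_iff _ _).2 hmin.1)
    obtain ⟨kp, hkp⟩ := hmaxk
    obtain ⟨kv, hkv⟩ := hmink
    have hnet := net_eq (a :: b :: t)
    simp only [List.tail_cons] at hnet
    -- now unfold both programs
    simp only [detect_contour_py, detect_contour_py_alt, diffsA_eq, hBM, hBm, if_neg hlen,
      PySem.List.max?_id_cons, PySem.List.min?_id_cons, Option.getD_some, hkp, hkv,
      PySem.List.slice?_none_none_neg_one, PySem.List.slice_to_neg_one,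
      PySem.List.slice_from_one, List.tail_cons, PySem.List.pyGet?_zero_cons,
      hstatic, sorted_eq_self_iff_chain, sorted_rev_eq_iff_chain,
      downs_zero_iff, ups_zero_iff]
    -- align the remaining numeric / positional conditions
    simp only [show (0 < kp ∧ kp < (a :: b :: t).length - 1 ∧
          (diffsZ (a :: b :: t)).countP (fun d => decide (d < 0)) ≤
            (diffsZ (a :: b :: t)).countP (fun d => decide (0 < d)))
        ↔ (¬ a = (b :: t).foldl max a ∧ (b :: t).foldl max a ∈ (a :: b :: t).dropLast ∧
          0 ≤ ((diffsZ (a :: b :: t)).countP (fun d => decide (0 < d)) : Int) -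
            ((diffsZ (a :: b :: t)).countP (fun d => decide (d < 0)) : Int)) from
      and_congr (index_pos_iff _ _ _ _ hkp) (and_congr
        (index_lt_iff_mem_dropLast _ _ _ hkp) (by omega))]
    simp only [show (0 < kv ∧ kv < (a :: b :: t).length - 1 ∧
          (diffsZ (a :: b :: t)).countP (fun d => decide (0 < d)) ≤
            (diffsZ (a :: b :: t)).countP (fun d => decide (d < 0)))
        ↔ (¬ a = (b :: t).foldl min a ∧ (b :: t).foldl min a ∈ (a :: b :: t).dropLast ∧
          ((diffsZ (a :: b :: t)).countP (fun d => decide (0 < d)) : Int) -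
            ((diffsZ (a :: b :: t)).countP (fun d => decide (d < 0)) : Int) ≤ 0) from
      and_congr (index_pos_iff _ _ _ _ hkv) (and_congr
        (index_lt_iff_mem_dropLast _ _ _ hkv) (by omega))]
    simp only [show ((diffsZ (a :: b :: t)).countP (fun d => decide (d < 0)) <
          (diffsZ (a :: b :: t)).countP (fun d => decide (0 < d)))
        ↔ (0 < ((diffsZ (a :: b :: t)).countP (fun d => decide (0 < d)) : Int) -
            ((diffsZ (a :: b :: t)).countP (fun d => decide (d < 0)) : Int)) from
      by omega]
    simp only [show ((diffsZ (a :: b :: t)).countP (fun d => decide (0 < d)) <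
          (diffsZ (a :: b :: t)).countP (fun d => decide (d < 0)))
        ↔ (((diffsZ (a :: b :: t)).countP (fun d => decide (0 < d)) : Int) -
            ((diffsZ (a :: b :: t)).countP (fun d => decide (d < 0)) : Int) < 0) from
      by omega]
    simp only [hnet, ne_eq]

-- ===== VERDICT (by name: the statement is the Claim_ definition above) =====
theorem detect_contour_py_spec : Claim_equal_detect_contour_py := by
  intro midi_seq _
  unfold Spec_detect_contour_py
  exact main_eq midi_seq
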